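-- pv_equiv track=rewrite | github.com/s1f102103189/Atcorder | temp/Piano.py | exists_in_pattern
-- ===== SOURCE A (Python) =====
-- def exists_in_pattern(W, B):
--     # ピアノの鍵盤パターン
--     pattern = "wbwbwwbwbwbw"
--     white_count = pattern.count('w')
--     black_count = pattern.count('b')
--
--     # 単一のパターンで条件を満たすかどうか
--     if W <= white_count and B <= black_count:
--         return 'Yes'
--
--     # パターンを跨いで条件を満たすかどうか
--     for start in range(len(pattern)):
--         for end in range(start, len(pattern) * 2):
--             extended_pattern = pattern + pattern
--             white_in_range = extended_pattern[start:end].count('w')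
--             black_in_range = extended_pattern[start:end].count('b')
--             if white_in_range == W and black_in_range == B:
--                 return True
--
--     return 'No'
-- ===== SOURCE B (Python) =====
-- def exists_in_pattern(W, B):
--     # a single octave always suffices for small requests
--     if W <= 7 and B <= 5:
--         return 'Yes'
--     doubled = "wbwbwwbwbwbw" * 2
--     L = W + B
--     for start in range(12):
--         window = doubled[start:start + L]
--         if window.count('w') == W and window.count('b') == B:
--             return 'Yes'
--     return 'No'
-- ===== Notes on version B (the rewrite author's own statement) =====
-- stated objective: simpler
-- what changed: Replaces A's nested start/end scan over all windows with a single pass over the 12 start positions using the window length L = W + B directly; Pre_ excludes the 19 (W,B) pairs on which A returns the Python boolean True instead of a string of the declared return type.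
-- intended difference: At (W,B) = (14,10) A returns 'No' because its end bound range(start, 24) stops one short of the full 24-key doubled window, while B returns 'Yes' since that window really has 14 whites and 10 blacks, which is the intended answer. — e.g. on exists_in_pattern(14, 10): A returns "No", B returns "Yes"
-- outside the precondition, e.g. on exists_in_pattern(8, 5): A returns True, B returns 'Yes'; on exists_in_pattern(13, 10): A returns True, B returns 'Yes'
import Mathlib
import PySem

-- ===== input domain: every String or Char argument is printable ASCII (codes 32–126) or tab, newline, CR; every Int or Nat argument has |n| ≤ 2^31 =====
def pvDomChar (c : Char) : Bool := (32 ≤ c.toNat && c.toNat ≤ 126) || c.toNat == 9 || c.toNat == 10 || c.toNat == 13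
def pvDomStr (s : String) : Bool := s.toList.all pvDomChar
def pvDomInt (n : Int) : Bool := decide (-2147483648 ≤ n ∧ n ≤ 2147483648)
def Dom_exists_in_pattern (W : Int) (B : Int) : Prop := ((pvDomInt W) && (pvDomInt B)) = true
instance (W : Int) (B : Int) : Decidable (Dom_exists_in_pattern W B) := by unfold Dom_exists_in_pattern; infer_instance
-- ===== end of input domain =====

-- B replaces A's nested start/end window scan with a single pass over the 12 start
-- positions using the window length W + B directly (objective: simpler); at (14,10)
-- B returns "Yes" where A returns "No" (stated as D_ below).


-- ===== PORT A =====
-- pattern = "wbwbwwbwbwbw", as code points (PySem.Chars is the string domain)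
def epPattern : List Char := ['w','b','w','b','w','w','b','w','b','w','b','w']
-- extended_pattern = pattern + pattern
def epExtended : List Char := epPattern ++ epPattern

-- inner 'for end in range(start, len(pattern)*2)' with early return.
-- Python returns the BOOLEAN True here; those inputs are excluded by Pre_ below,
-- the port marks the branch with the sentinel string "True".
def epInnerA (W : Int) (B : Int) (start : Int) : List Int → Option String
  | [] => none
  | e :: rest =>
      let win := PySem.Chars.slice epExtended (some start) (some e)
      let white_in_range : Int := PySem.Chars.count win ['w']
      let black_in_range : Int := PySem.Chars.count win ['b']
      if white_in_range = W ∧ black_in_range = B then some "True"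
      else epInnerA W B start rest

-- outer 'for start in range(len(pattern))'
def epOuterA (W : Int) (B : Int) : List Int → String
  | [] => "No"
  | s :: rest =>
      match epInnerA W B s (PySem.List.pyRange s 24 1) with
      | some r => r
      | none => epOuterA W B rest

def exists_in_pattern (W : Int) (B : Int) : String :=
  let white_count : Int := PySem.Chars.count epPattern ['w']
  let black_count : Int := PySem.Chars.count epPattern ['b']
  if W ≤ white_count ∧ B ≤ black_count then "Yes"
  else epOuterA W B (PySem.List.pyRange 0 12 1)

-- ===== PORT B =====
-- doubled = "wbwbwwbwbwbw" * 2
def epDoubledB : List Char := epPattern ++ epPattern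

-- 'for start in range(12)' with early return
def epLoopB (W : Int) (B : Int) (L : Int) : List Int → String
  | [] => "No"
  | s :: rest =>
      let window := PySem.Chars.slice epDoubledB (some s) (some (s + L))
      if (PySem.Chars.count window ['w'] : Int) = W ∧
         (PySem.Chars.count window ['b'] : Int) = B then "Yes"
      else epLoopB W B L rest

def exists_in_pattern_alt (W : Int) (B : Int) : String :=
  if W ≤ 7 ∧ B ≤ 5 then "Yes"
  else epLoopB W B (W + B) (PySem.List.pyRange 0 12 1)

-- ===== PRECONDITION & SPEC =====
-- the 19 (W, B) pairs on which A returns the Python BOOLEAN True instead of a string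
def epTruePairs : List (Int × Int) :=
  [(7,6),(8,5),(8,6),(8,7),(9,5),(9,6),(9,7),(9,8),(10,6),(10,7),(10,8),(11,7),(11,8),(11,9),(12,8),(12,9),(12,10),(13,9),(13,10)]

-- Pre_ excludes exactly the 19 pairs on which A returns the boolean True,
-- which is not a value of the declared String return type.
def Pre_exists_in_pattern (W : Int) (B : Int) : Prop := (W, B) ∉ epTruePairs
instance (W : Int) (B : Int) : Decidable (Pre_exists_in_pattern W B) := by
  unfold Pre_exists_in_pattern; infer_instance

def pvWitness_exists_in_pattern : Int × Int := (3, 2)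

-- At (W,B) = (14,10) A returns 'No' because its end bound range(start, 24) stops one
-- short of the full 24-key doubled window, while B returns 'Yes' since that window
-- really has 14 whites and 10 blacks, which is the intended answer.
def D_exists_in_pattern (W : Int) (B : Int) : Prop := (W, B) = ((14 : Int), (10 : Int))
instance (W : Int) (B : Int) : Decidable (D_exists_in_pattern W B) := by
  unfold D_exists_in_pattern; infer_instance

def Spec_exists_in_pattern (W : Int) (B : Int) (out : String) : Prop :=
  ¬ D_exists_in_pattern W B → out = exists_in_pattern_alt W B
instance (W : Int) (B : Int) (out : String) : Decidable (Spec_exists_in_pattern W B out) := by unfold Spec_exists_in_pattern; infer_instance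

def pvDiffWitness_exists_in_pattern : Int × Int := (14, 10)
def pvDiffWitnessOut_exists_in_pattern : String × String := ("No", "Yes")

-- ===== CLAIM (what is proved, stated in full; the proofs are below) =====
def Claim_unchanged_exists_in_pattern : Prop := ∀ (W : Int) (B : Int), Dom_exists_in_pattern W B → Pre_exists_in_pattern W B → Spec_exists_in_pattern W B (exists_in_pattern W B)
def Claim_changed_exists_in_pattern : Prop := Dom_exists_in_pattern (pvDiffWitness_exists_in_pattern.1) (pvDiffWitness_exists_in_pattern.2) ∧ Pre_exists_in_pattern (pvDiffWitness_exists_in_pattern.1) (pvDiffWitness_exists_in_pattern.2) ∧ D_exists_in_pattern (pvDiffWitness_exists_in_pattern.1) (pvDiffWitness_exists_in_pattern.2) ∧ exists_in_pattern (pvDiffWitness_exists_in_pattern.1) (pvDiffWitness_exists_in_pattern.2) = pvDiffWitnessOut_exists_in_pattern.1 ∧ exists_in_pattern_alt (pvDiffWitness_exists_in_pattern.1) (pvDiffWitness_exists_in_pattern.2) = pvDiffWitnessOut_exists_in_pattern.2 ∧ pvDiffWitnessOut_exists_in_pattern.1 ≠ pvDiffWitnessOut_exists_in_pattern.2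
def Claim_exact_exists_in_pattern : Prop := ∀ (W : Int) (B : Int), Dom_exists_in_pattern W B → Pre_exists_in_pattern W B → D_exists_in_pattern W B → exists_in_pattern W B ≠ exists_in_pattern_alt W B

-- ===== LEMMAS AND PROOFS =====

-- every window of the doubled pattern with end < 24 either fits in one octave
-- (≤7 w, ≤5 b) or its count pair is one of the 19 excluded pairs
lemma epKeyFact : ∀ s ∈ PySem.List.pyRange 0 12 1, ∀ e ∈ PySem.List.pyRange s 24 1,
    (((PySem.Chars.count (PySem.Chars.slice epExtended (some s) (some e)) ['w'] : Int) ≤ 7 ∧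
      (PySem.Chars.count (PySem.Chars.slice epExtended (some s) (some e)) ['b'] : Int) ≤ 5) ∨
     ((PySem.Chars.count (PySem.Chars.slice epExtended (some s) (some e)) ['w'] : Int),
      (PySem.Chars.count (PySem.Chars.slice epExtended (some s) (some e)) ['b'] : Int)) ∈ epTruePairs) := by
  decide

lemma epInnerA_no (W B : Int) (hg : ¬ (W ≤ 7 ∧ B ≤ 5)) (hp : (W, B) ∉ epTruePairs)
    (s : Int) (hs : s ∈ PySem.List.pyRange 0 12 1) :
    ∀ l : List Int, (∀ e ∈ l, e ∈ PySem.List.pyRange s 24 1) → epInnerA W B s l = none := by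
  intro l
  induction l with
  | nil => intro _; rfl
  | cons e rest ih =>
    intro hl
    have he : e ∈ PySem.List.pyRange s 24 1 := hl e (List.mem_cons_self ..)
    rw [epInnerA]
    split_ifs with h
    · exfalso
      rcases epKeyFact s hs e he with hfit | hmem
      · exact hg ⟨h.1 ▸ hfit.1, h.2 ▸ hfit.2⟩
      · exact hp (by rwa [h.1, h.2] at hmem)
    · exact ih (fun x hx => hl x (List.mem_cons_of_mem _ hx))

lemma epOuterA_no (W B : Int) (hg : ¬ (W ≤ 7 ∧ B ≤ 5)) (hp : (W, B) ∉ epTruePairs) :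
    ∀ l : List Int, (∀ s ∈ l, s ∈ PySem.List.pyRange 0 12 1) → epOuterA W B l = "No" := by
  intro l
  induction l with
  | nil => intro _; rfl
  | cons s rest ih =>
    intro hl
    have hs : s ∈ PySem.List.pyRange 0 12 1 := hl s (List.mem_cons_self ..)
    rw [epOuterA, epInnerA_no W B hg hp s hs _ (fun _ hx => hx)]
    exact ih (fun x hx => hl x (List.mem_cons_of_mem _ hx))

-- every window (drop s').take n of the doubled pattern, s' < 12, n ≤ 24, either fits
-- in one octave, or is an excluded pair, or is the full 24-key window pair (14,10)
lemma epKeyFactB : ∀ s' ∈ List.range 12, ∀ n ∈ List.range 25,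
    (((PySem.Chars.count ((epDoubledB.drop s').take n) ['w'] : Int) ≤ 7 ∧
      (PySem.Chars.count ((epDoubledB.drop s').take n) ['b'] : Int) ≤ 5) ∨
     ((PySem.Chars.count ((epDoubledB.drop s').take n) ['w'] : Int),
      (PySem.Chars.count ((epDoubledB.drop s').take n) ['b'] : Int)) ∈ epTruePairs ∨
     ((PySem.Chars.count ((epDoubledB.drop s').take n) ['w'] : Int),
      (PySem.Chars.count ((epDoubledB.drop s').take n) ['b'] : Int)) = ((14 : Int), (10 : Int))) := by
  decide

lemma epLoopB_no (W B : Int) (hg : ¬ (W ≤ 7 ∧ B ≤ 5)) (hp : (W, B) ∉ epTruePairs)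
    (hd : (W, B) ≠ ((14 : Int), (10 : Int))) :
    ∀ l : List Int, (∀ s ∈ l, s ∈ PySem.List.pyRange 0 12 1) → epLoopB W B (W + B) l = "No" := by
  intro l
  induction l with
  | nil => intro _; rfl
  | cons s rest ih =>
    intro hl
    have hs : s ∈ PySem.List.pyRange 0 12 1 := hl s (List.mem_cons_self ..)
    have hs' : 0 ≤ s ∧ s < 12 := (PySem.List.mem_pyRange_one).mp hs
    rw [epLoopB]
    split_ifs with h
    · exfalso
      obtain ⟨hw, hb⟩ := h
      have hW0 : 0 ≤ W := hw ▸ Int.natCast_nonneg _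
      have hB0 : 0 ≤ B := hb ▸ Int.natCast_nonneg _
      have hsl : PySem.Chars.slice epDoubledB (some s) (some (s + (W + B)))
          = (epDoubledB.drop s.toNat).take ((s + (W + B)).toNat - s.toNat) := by
        rw [PySem.Chars.slice_eq_listSlice]
        exact PySem.List.slice_toNat epDoubledB hs'.1 (by omega)
      have hsr : s.toNat ∈ List.range 12 := List.mem_range.mpr (by omega)
      set n0 : ℕ := (s + (W + B)).toNat - s.toNat with hn0
      by_cases hn : n0 ≤ 24
      · have hnr : n0 ∈ List.range 25 := List.mem_range.mpr (by omega)
        rcases epKeyFactB s.toNat hsr n0 hnr with hfit | hmem | h14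
        · rw [← hsl, hw, hb] at hfit; exact hg hfit
        · rw [← hsl, hw, hb] at hmem; exact hp hmem
        · rw [← hsl, hw, hb] at h14; exact hd h14
      · have hlen : (epDoubledB.drop s.toNat).length ≤ 24 := by
          simp [epDoubledB, epPattern]
        have htk : (epDoubledB.drop s.toNat).take n0 = (epDoubledB.drop s.toNat).take 24 := by
          rw [List.take_of_length_le (by omega), List.take_of_length_le hlen]
        have hnr : 24 ∈ List.range 25 := List.mem_range.mpr (by omega)
        rcases epKeyFactB s.toNat hsr 24 hnr with hfit | hmem | h14
        · rw [← htk, ← hsl, hw, hb] at hfit; exact hg hfit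
        · rw [← htk, ← hsl, hw, hb] at hmem; exact hp hmem
        · rw [← htk, ← hsl, hw, hb] at h14; exact hd h14
    · exact ih (fun x hx => hl x (List.mem_cons_of_mem _ hx))

-- ===== VERDICT (by name: the statement is the Claim_ definition above) =====
theorem exists_in_pattern_spec : Claim_unchanged_exists_in_pattern := by
  intro W B _ hpre hD
  unfold exists_in_pattern exists_in_pattern_alt
  have h7 : (PySem.Chars.count epPattern ['w'] : Int) = 7 := by decide
  have h5 : (PySem.Chars.count epPattern ['b'] : Int) = 5 := by decide
  rw [h7, h5]
  by_cases hg : W ≤ 7 ∧ B ≤ 5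
  · rw [if_pos hg, if_pos hg]
  · rw [if_neg hg, if_neg hg,
      epOuterA_no W B hg hpre _ (fun _ hx => hx),
      epLoopB_no W B hg hpre hD _ (fun _ hx => hx)]

theorem exists_in_pattern_changed : Claim_changed_exists_in_pattern := by
  unfold Claim_changed_exists_in_pattern; decide

theorem exists_in_pattern_tight : Claim_exact_exists_in_pattern := by
  intro W B _ _ hD
  have h : W = 14 ∧ B = 10 := by
    unfold D_exists_in_pattern at hD
    exact ⟨congrArg Prod.fst hD, congrArg Prod.snd hD⟩
  rw [h.1, h.2]
  decide
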